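-- pv_equiv track=rewrite | github.com/lin5547/cola | app/weibo/GenerateChatPairs.py | CombineSameName
-- ===== SOURCE A (Python) =====
-- def CombineSameName(data):
--     tmpdata=[]
--     for i in range(len(data)):
--         if i==0:
--             tmpdata.append(data[i])
--             continue
--
--         last=data[i-1]['n1']+u':'+data[i-1]['n2']
--         cur = data[i]['n1']+u':'+data[i]['n2']
--         if last==cur:
--             tmpdata[-1]['content'] += data[i]['content']
--         else:tmpdata.append(data[i])
--     return tmpdata
-- ===== SOURCE B (Python) =====
-- def CombineSameName(data):
--     # Run-at-a-time: an outer loop walks the list run by run; an inner scan finds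
--     # the end of the current run of equal adjacent name pairs, then the run's
--     # contents are concatenated onto the run's first record in one ''.join.
--     out = []
--     i, n = 0, len(data)
--     while i < n:
--         j = i + 1
--         while j < n and data[j]['n1'] + u':' + data[j]['n2'] == data[j - 1]['n1'] + u':' + data[j - 1]['n2']:
--             j += 1
--         first = data[i]
--         if j > i + 1:
--             first['content'] += u''.join(r['content'] for r in data[i + 1:j])
--         out.append(first)
--         i = j
--     return out
-- ===== Notes on version B (the rewrite author's own statement) =====
-- stated objective: alternative
-- what changed: A makes one element-at-a-time index pass comparing each record's name pair with its predecessor's and patching tmpdata[-1]'s content repeatedly; B decomposes the list run by run: a nested scan finds each maximal run of equal name pairs against the run head's key and the run's contents are concatenated onto the head in a single ''.join.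
import Mathlib
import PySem

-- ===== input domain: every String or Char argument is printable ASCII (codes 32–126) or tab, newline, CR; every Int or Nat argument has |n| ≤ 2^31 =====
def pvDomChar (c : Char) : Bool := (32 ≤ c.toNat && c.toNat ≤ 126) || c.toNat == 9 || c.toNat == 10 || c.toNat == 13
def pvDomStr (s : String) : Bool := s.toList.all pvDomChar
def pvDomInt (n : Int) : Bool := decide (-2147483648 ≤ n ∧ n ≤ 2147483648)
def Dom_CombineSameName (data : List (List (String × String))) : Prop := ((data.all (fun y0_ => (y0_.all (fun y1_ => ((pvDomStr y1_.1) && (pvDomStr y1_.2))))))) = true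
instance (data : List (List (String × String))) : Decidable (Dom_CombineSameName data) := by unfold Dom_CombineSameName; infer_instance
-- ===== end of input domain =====

-- B replaces A's element-at-a-time index pass (comparing each record with its predecessor and
-- patching tmpdata[-1] repeatedly) by a run-at-a-time decomposition: a nested scan finds each
-- maximal run of equal name pairs and joins the run's contents in one concatenation
-- (objective: alternative). Both Pythons mutate each run's first record's 'content' in place;
-- the theorems below are about the RETURN value.

-- shared record helpers (a record is a Python dict, modelled as an assoc list with unique keys)
def pvKey (r : List (String × String)) : String :=
  PySem.Dict.getD (PySem.Dict.mk r) "n1" "" ++ ":" ++ PySem.Dict.getD (PySem.Dict.mk r) "n2" ""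

def pvContent (r : List (String × String)) : String :=
  PySem.Dict.getD (PySem.Dict.mk r) "content" ""

-- r['content'] += s  (overwrite keeps the key's position, exactly Python's in-place update)
def pvAddContent (r : List (String × String)) (s : String) : List (String × String) :=
  (PySem.Dict.modify (PySem.Dict.mk r) "content" "" (fun c => c ++ s)).items

-- ===== PORT A =====
def CombineSameName (data : List (List (String × String))) : List (List (String × String)) :=
  (PySem.List.pyRange 0 (data.length : Int) 1).foldl
    (fun tmpdata i =>
      if i = 0 then tmpdata ++ [PySem.List.pyGetD data i []]
      else
        let last := pvKey (PySem.List.pyGetD data (i - 1) [])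
        let cur := pvKey (PySem.List.pyGetD data i [])
        if last = cur then
          tmpdata.dropLast ++
            [pvAddContent (PySem.List.pyGetD tmpdata (-1) []) (pvContent (PySem.List.pyGetD data i []))]
        else tmpdata ++ [PySem.List.pyGetD data i []]) []

-- ===== PORT B =====
-- inner while loop of Source B: split off the records whose name pair equals their predecessor's
def pvSplitRun (prev : List (String × String)) : List (List (String × String)) →
    List (List (String × String)) × List (List (String × String))
  | [] => ([], [])
  | r :: t =>
    if pvKey r = pvKey prev then
      let p := pvSplitRun r t
      (r :: p.1, p.2)
    else ([], r :: t)

theorem pvSplitRun_len :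
    ∀ (t : List (List (String × String))) (prev : List (String × String)),
      (pvSplitRun prev t).2.length ≤ t.length := by
  intro t
  induction t with
  | nil => intro prev; simp [pvSplitRun]
  | cons r u ih =>
    intro prev
    by_cases h : pvKey r = pvKey prev <;> simp [pvSplitRun, h]
    have := ih r
    omega

def CombineSameName_alt : List (List (String × String)) → List (List (String × String))
  | [] => []
  | first :: t =>
    let res := pvSplitRun first t
    (if res.1.isEmpty then first
     else pvAddContent first (String.join (res.1.map pvContent))) :: CombineSameName_alt res.2
  termination_by l => l.length
  decreasing_by
    have := pvSplitRun_len t first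
    simp only [List.length_cons]
    omega

-- ===== PRECONDITION & SPEC =====
def pvHasK (r : List (String × String)) (k : String) : Prop :=
  PySem.Dict.contains (PySem.Dict.mk r) k = true

-- Pre_ excludes (a) inputs where the Pythons raise KeyError: a record adjacent to another record
-- while lacking 'n1'/'n2', or two adjacent records with equal name pairs where either lacks
-- 'content'; and (b) records with duplicate keys, which a Python dict cannot represent (dict
-- construction keeps only the last binding while the assoc-list model looks up the first).
def Pre_CombineSameName (data : List (List (String × String))) : Prop :=
  List.IsChain
    (fun a b =>
      pvHasK a "n1" ∧ pvHasK a "n2" ∧ pvHasK b "n1" ∧ pvHasK b "n2" ∧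
        (pvKey a = pvKey b → pvHasK a "content" ∧ pvHasK b "content")) data
  ∧ ∀ r ∈ data, (r.map Prod.fst).Nodup

instance (data : List (List (String × String))) : Decidable (Pre_CombineSameName data) := by
  unfold Pre_CombineSameName pvHasK; infer_instance

def pvWitness_CombineSameName : (List (List (String × String))) :=
  [[("n1", "a"), ("n2", "b"), ("content", "x")],
   [("n1", "a"), ("n2", "b"), ("content", "y")],
   [("n1", "c"), ("n2", "b"), ("content", "z")]]

def Spec_CombineSameName (data : List (List (String × String))) (out : List (List (String × String))) : Prop := out = CombineSameName_alt data
instance (data : List (List (String × String))) (out : List (List (String × String))) : Decidable (Spec_CombineSameName data out) := by unfold Spec_CombineSameName; infer_instance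

-- ===== CLAIM (what is proved, stated in full; the proofs are below) =====
def Claim_equal_CombineSameName : Prop := ∀ (data : List (List (String × String))), Dom_CombineSameName data → Pre_CombineSameName data → Spec_CombineSameName data (CombineSameName data)

-- ===== LEMMAS AND PROOFS =====

-- the common spec: left-to-right run merging, carrying the current run's (merged) first record
def pvMergeRuns (p : List (String × String)) :
    List (List (String × String)) → List (List (String × String))
  | [] => [p]
  | r :: t =>
    if pvKey p = pvKey r then pvMergeRuns (pvAddContent p (pvContent r)) t
    else p :: pvMergeRuns r t

def pvM1 : List (List (String × String)) → List (List (String × String))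
  | [] => []
  | x :: xs => pvMergeRuns x xs

theorem pvMk_items (d : PySem.Dict String String) : PySem.Dict.mk d.items = d := rfl

theorem pvKey_addContent (r : List (String × String)) (s : String) :
    pvKey (pvAddContent r s) = pvKey r := by
  simp [pvKey, pvAddContent, pvMk_items, PySem.Dict.getD_modify]

theorem pvAddContent_addContent (r : List (String × String)) (s t : String) :
    pvAddContent (pvAddContent r s) t = pvAddContent r (s ++ t) := by
  simp [pvAddContent, pvMk_items, PySem.Dict.modify, PySem.Dict.getD_insert_self,
    PySem.Dict.insert_insert_self, String.append_assoc]

-- String.join facts (Source B's ''.join)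
theorem pvFoldl_append (l : List String) :
    ∀ a : String, l.foldl (· ++ ·) a = a ++ String.join l := by
  induction l with
  | nil => intro a; simp [String.join]
  | cons c t ih =>
    intro a
    rw [List.foldl_cons, ih (a ++ c)]
    conv_rhs => rw [String.join, List.foldl_cons, ih ("" ++ c)]
    simp [String.append_assoc]

theorem pvJoin_cons (c : String) (l : List String) :
    String.join (c :: l) = c ++ String.join l := by
  rw [String.join, List.foldl_cons, pvFoldl_append]
  simp

-- folding += over a nonempty run equals one += of the joined contents
theorem pvFold_add (run : List (List (String × String))) :
    ∀ p, run ≠ [] →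
      run.foldl (fun q r => pvAddContent q (pvContent r)) p =
        pvAddContent p (String.join (run.map pvContent)) := by
  induction run with
  | nil => intro p h; exact absurd rfl h
  | cons r rs ih =>
    intro p _
    rw [List.foldl_cons, List.map_cons, pvJoin_cons]
    cases rs with
    | nil => simp [String.join]
    | cons r2 rs2 =>
      rw [ih _ (by simp), pvAddContent_addContent]

-- pvMergeRuns processes exactly the run pvSplitRun splits off (prev tracks the previous
-- original record, whose key equals the pending merged record p's key)
theorem pvMergeRuns_split :
    ∀ (t : List (List (String × String))) (p prev : List (String × String)),
      pvKey prev = pvKey p →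
      pvMergeRuns p t =
        (pvSplitRun prev t).1.foldl (fun q r => pvAddContent q (pvContent r)) p ::
          pvM1 (pvSplitRun prev t).2 := by
  intro t
  induction t with
  | nil => intro p prev _; rfl
  | cons r u ih =>
    intro p prev hk
    by_cases h : pvKey p = pvKey r
    · rw [pvMergeRuns, if_pos h, pvSplitRun, if_pos (by rw [hk, ← h])]
      have := ih (pvAddContent p (pvContent r)) r (by rw [pvKey_addContent, h])
      rw [this, List.foldl_cons]
    · rw [pvMergeRuns, if_neg h, pvSplitRun, if_neg (by rw [hk]; exact fun hh => h hh.symm)]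
      rfl

-- B equals pvMergeRuns
theorem pvB_eq_mergeRuns :
    ∀ (n : Nat) (data : List (List (String × String))), data.length ≤ n →
      CombineSameName_alt data = pvM1 data := by
  intro n
  induction n with
  | zero =>
    intro data h
    have : data = [] := List.eq_nil_of_length_eq_zero (by omega)
    subst this; simp [CombineSameName_alt, pvM1]
  | succ n ih =>
    intro data h
    cases data with
    | nil => simp [CombineSameName_alt, pvM1]
    | cons x t =>
      rw [CombineSameName_alt]
      have hrest := pvSplitRun_len t x
      rw [ih _ (by simp at h; omega)]
      rw [show pvM1 (x :: t) = pvMergeRuns x t from rfl, pvMergeRuns_split t x x rfl]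
      rcases hE : (pvSplitRun x t).1 with _ | ⟨r, rs⟩
      · simp
      · rw [pvFold_add (r :: rs) x (by simp)]
        simp

-- A's index reads data[i-1], data[i] are the zipped neighbour pairs
theorem pvPairs (data : List (List (String × String))) :
    ∀ (j k : Nat), k + j = data.length → 1 ≤ k →
      (PySem.List.pyRange (k : Int) (data.length : Int) 1).map
          (fun i => (PySem.List.pyGetD data (i - 1) [], PySem.List.pyGetD data i [])) =
        (data.drop (k - 1)).zip (data.drop k) := by
  intro j
  induction j with
  | zero =>
    intro k hk _
    rw [PySem.List.pyRange_one_eq_nil (by omega), List.map_nil]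
    have : data.drop k = [] := by
      apply List.drop_eq_nil_of_le; omega
    rw [this, List.zip_nil_right]
  | succ j ih =>
    intro k hk h1
    have hklt : k < data.length := by omega
    rw [PySem.List.pyRange_one_cons (by exact_mod_cast hklt), List.map_cons]
    have e1 : ((k : Int) - 1) = ((k - 1 : Nat) : Int) := by omega
    have e2 : ((k : Int) + 1) = ((k + 1 : Nat) : Int) := by omega
    rw [e1, e2, ih (k + 1) (by omega) (by omega)]
    rw [PySem.List.pyGetD_eq_getElem (i := ((k - 1 : Nat) : Int)) data [] (by positivity)
        (by exact_mod_cast (by omega : (k - 1 : Nat) < data.length)),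
      PySem.List.pyGetD_eq_getElem (i := (k : Int)) data [] (by positivity) (by exact_mod_cast hklt)]
    rw [List.drop_eq_getElem_cons (by omega : k - 1 < data.length),
      List.drop_eq_getElem_cons hklt, List.zip_cons_cons]
    have e3 : k - 1 + 1 = k := by omega
    simp [e3]

-- A's loop over neighbour pairs equals pvMergeRuns (key of the pending merged record p tracks
-- the key of the previous original record prev, since merging never changes 'n1'/'n2')
theorem pvLoopA (t : List (List (String × String))) :
    ∀ (prev p : List (String × String)) (done : List (List (String × String))),
      pvKey prev = pvKey p →
      ((prev :: t).zip t).foldl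
          (fun tmp pc =>
            if pvKey pc.1 = pvKey pc.2 then
              tmp.dropLast ++ [pvAddContent (PySem.List.pyGetD tmp (-1) []) (pvContent pc.2)]
            else tmp ++ [pc.2]) (done ++ [p]) =
        done ++ pvMergeRuns p t := by
  induction t with
  | nil => intro prev p done _; rw [List.zip_nil_right]; rfl
  | cons r u ih =>
    intro prev p done hk
    rw [List.zip_cons_cons, List.foldl_cons]
    by_cases h : pvKey prev = pvKey r
    · simp only [if_pos h, List.dropLast_concat, PySem.List.pyGetD_neg_one_append_singleton]
      rw [ih r (pvAddContent p (pvContent r)) done (by rw [pvKey_addContent, ← hk, h])]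
      rw [pvMergeRuns, if_pos (hk ▸ h)]
    · simp only [if_neg h]
      rw [ih r r (done ++ [p]) rfl]
      rw [pvMergeRuns, if_neg (fun hh => h (hk.symm ▸ hh)), List.append_assoc]
      rfl

theorem pvA_eq_mergeRuns (x : List (String × String)) (xs : List (List (String × String))) :
    CombineSameName (x :: xs) = pvMergeRuns x xs := by
  rw [CombineSameName]
  have hn : (1 : Int) ≤ ((x :: xs).length : Int) := by simp
  rw [PySem.List.pyRange_one_append 0 1 ((x :: xs).length : Int) (by omega) hn,
    List.foldl_append]
  have h01 : PySem.List.pyRange 0 1 1 = [0] := by decide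
  rw [h01, List.foldl_cons]
  simp only [if_true, PySem.List.pyGetD_zero_cons, List.foldl_nil, List.nil_append]
  rw [PySem.List.foldl_congr_mem _ _
    (fun tmp i =>
      if pvKey (PySem.List.pyGetD (x :: xs) (i - 1) []) =
          pvKey (PySem.List.pyGetD (x :: xs) i []) then
        tmp.dropLast ++
          [pvAddContent (PySem.List.pyGetD tmp (-1) [])
              (pvContent (PySem.List.pyGetD (x :: xs) i []))]
      else tmp ++ [PySem.List.pyGetD (x :: xs) i []]) _
    (by
      intro acc i hi
      have h1 : (1 : Int) ≤ i := (PySem.List.mem_pyRange_one.1 hi).1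
      have h0 : ¬ i = 0 := by omega
      simp only [h0, if_false])]
  have hp := pvPairs (x :: xs) xs.length 1 (by simp only [List.length_cons]; omega) le_rfl
  simp only [Nat.cast_one, Nat.sub_self, List.drop_zero, List.drop_succ_cons,
    List.drop_zero] at hp
  have hmap :
      List.foldl
        (fun tmp i =>
          if pvKey (PySem.List.pyGetD (x :: xs) (i - 1) []) =
              pvKey (PySem.List.pyGetD (x :: xs) i []) then
            tmp.dropLast ++
              [pvAddContent (PySem.List.pyGetD tmp (-1) [])
                  (pvContent (PySem.List.pyGetD (x :: xs) i []))]
          else tmp ++ [PySem.List.pyGetD (x :: xs) i []]) [x]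
        (PySem.List.pyRange 1 ((x :: xs).length : Int) 1) =
      List.foldl
        (fun tmp pc =>
          if pvKey pc.1 = pvKey pc.2 then
            tmp.dropLast ++ [pvAddContent (PySem.List.pyGetD tmp (-1) []) (pvContent pc.2)]
          else tmp ++ [pc.2]) [x]
        ((PySem.List.pyRange 1 ((x :: xs).length : Int) 1).map
          (fun i => (PySem.List.pyGetD (x :: xs) (i - 1) [], PySem.List.pyGetD (x :: xs) i []))) := by
    rw [List.foldl_map]
  rw [hmap, hp]
  simpa using pvLoopA xs x x [] rfl

-- ===== VERDICT (by name: the statement is the Claim_ definition above) =====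
theorem CombineSameName_spec : Claim_equal_CombineSameName := by
  intro data _ _
  unfold Spec_CombineSameName
  rw [pvB_eq_mergeRuns data.length data le_rfl]
  cases data with
  | nil => rfl
  | cons x xs => exact pvA_eq_mergeRuns x xs
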